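-- pv_equiv track=rewrite | github.com/wlghsp/ProblemSolving_Everyday | 프로그래머스/Level2/택배상자/택배상자-1.py | solution
-- ===== SOURCE A (Python) =====
-- from collections import deque
--
-- def solution(order):
--     truck = []
--     main_belt = deque([i for i in range(1, len(order) + 1)])
--     sub_belt = []
--     idx = 0
--
--     def can_proceed():
--         if (main_belt and main_belt[0] == order[idx]) or (sub_belt and sub_belt[-1] == order[idx]):
--             return True
--         return False
--
--     while main_belt or can_proceed():
--         if main_belt and main_belt[0] == order[idx]:
--             truck.append(main_belt.popleft())
--             idx += 1
--         elif sub_belt and sub_belt[-1] == order[idx]: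
--             truck.append(sub_belt.pop())
--             idx += 1
--         else:
--             sub_belt.append(main_belt.popleft())
--
--     return len(truck)
-- ===== SOURCE B (Python) =====
-- def solution(order):
--     # No belt/stack simulation: track the set of loaded boxes, the largest box
--     # taken off the main belt (M), and the current top of the implicit side
--     # stack (the largest box <= M not yet loaded), recovered by scanning down
--     # through the loaded set.
--     n = len(order)
--     loaded = set()
--     M = 0
--     top = 0
--     count = 0
--     for t in order:
--         if top and t == top:
--             loaded.add(t)
--             top -= 1
--             while top and top in loaded:
--                 top -= 1
--             count += 1
--         elif M < t <= n:
--             loaded.add(t)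
--             if M < t - 1:
--                 top = t - 1
--             M = t
--             count += 1
--         else:
--             break
--     return count
-- ===== Notes on version B (the rewrite author's own statement) =====
-- stated objective: alternative
-- what changed: Replaces the belt/stack simulation (deque of all boxes plus an explicit side-stack list) by a stackless single pass over the targets that keeps only a hash set of loaded boxes, the largest box taken from the belt, and the current implicit stack top, recovered after each pop by scanning down through the loaded set.
import Mathlib
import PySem

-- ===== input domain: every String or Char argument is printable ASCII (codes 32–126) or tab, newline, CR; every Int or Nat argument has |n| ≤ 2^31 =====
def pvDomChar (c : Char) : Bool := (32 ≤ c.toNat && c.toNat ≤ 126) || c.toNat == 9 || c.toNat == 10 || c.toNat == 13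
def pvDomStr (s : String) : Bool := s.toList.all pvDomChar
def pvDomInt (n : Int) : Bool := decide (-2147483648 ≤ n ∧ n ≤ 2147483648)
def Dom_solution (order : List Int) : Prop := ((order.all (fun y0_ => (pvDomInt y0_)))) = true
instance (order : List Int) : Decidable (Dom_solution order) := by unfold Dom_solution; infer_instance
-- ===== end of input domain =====

-- B drops A's belt/stack simulation entirely: one pass over the targets keeping only a set of
-- loaded boxes, the largest box taken from the belt, and the implicit stack top recovered by
-- scanning down through the loaded set (objective: alternative data structure, no stack).

-- ===== PORT A =====
-- can_proceed(): Python reads order[idx]; when idx is out of range Python would raise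
-- IndexError, but that read is short-circuited away exactly when both belts are empty,
-- and from solution's initial state idx never leaves range while a belt is nonempty;
-- the `none` branches below are therefore unreachable from `solution`.
def canProceedA (order : List Int) (idx : Int) (main sub : List Int) : Bool :=
  (decide (main ≠ []) || decide (sub ≠ [])) &&
    match PySem.List.pyGet? order idx with
    | none => false
    | some t => (decide (main ≠ []) && (main.head? == some t)) ||
                (decide (sub ≠ []) && (sub.getLast? == some t))

-- the while loop of A, state = (main_belt, sub_belt, truck, idx); returns len(truck)
def loopA (order main sub truck : List Int) (idx : Int) : Int :=
  if decide (main ≠ []) || canProceedA order idx main sub then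
    match PySem.List.pyGet? order idx with
    | none => truck.length  -- Python: IndexError; unreachable from solution's initial state
    | some t =>
      match main with
      | m :: ms =>
        if m = t then loopA order ms sub (truck ++ [m]) (idx + 1)
        else if sub.getLast? = some t then
          loopA order (m :: ms) sub.dropLast (truck ++ [t]) (idx + 1)
        else loopA order ms (sub ++ [m]) truck idx
      | [] =>
        if sub.getLast? = some t then loopA order [] sub.dropLast (truck ++ [t]) (idx + 1)
        else truck.length  -- Python: popleft from empty deque; unreachable (loop guard)
  else truck.length
termination_by 2 * main.length + sub.length
decreasing_by
  all_goals
    first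
      | (simp; done)
      | (simp; omega)
      | (have hs : sub ≠ [] := by intro h; subst h; simp_all
         have := List.length_pos_of_ne_nil hs
         simp [List.length_dropLast]; omega)

def solution (order : List Int) : Int :=
  loopA order (PySem.List.pyRange 1 ((order.length : Int) + 1) 1) [] [] 0

-- ===== PORT B =====
-- the inner `while top and top in loaded: top -= 1`; at every call site top is nonnegative,
-- so Python's truthiness test `top` is written `0 < x` (which termination needs)
def scanDown (loaded : PySem.Set Int) (x : Int) : Int :=
  if h : 0 < x ∧ PySem.Set.contains loaded x then scanDown loaded (x - 1) else x
termination_by x.toNat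
decreasing_by
  have := h.1
  omega

-- the for-loop of B, state = (loaded, M, top, count)
def bLoop (n : Int) (rest : List Int) (loaded : PySem.Set Int) (M top count : Int) : Int :=
  match rest with
  | [] => count
  | t :: rest' =>
    if top ≠ 0 ∧ t = top then
      bLoop n rest' (PySem.Set.add loaded t) M
        (scanDown (PySem.Set.add loaded t) (top - 1)) (count + 1)
    else if M < t ∧ t ≤ n then
      bLoop n rest' (PySem.Set.add loaded t) t (if M < t - 1 then t - 1 else top) (count + 1)
    else count

def solution_alt (order : List Int) : Int :=
  bLoop (order.length : Int) order PySem.Set.empty 0 0 0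

-- ===== PRECONDITION & SPEC =====
def Spec_solution (order : List Int) (out : Int) : Prop := out = solution_alt order
instance (order : List Int) (out : Int) : Decidable (Spec_solution order out) := by unfold Spec_solution; infer_instance

-- ===== CLAIM (what is proved, stated in full; the proofs are below) =====
def Claim_equal_solution : Prop := ∀ (order : List Int), Dom_solution order → Spec_solution order (solution order)

-- ===== LEMMAS AND PROOFS =====

-- An intermediate program used ONLY by the proof: A's loop re-expressed as a pass over the
-- target list with an explicit stack `sub` and a next-box counter `nxt`.  The proof goes
-- A = (bInner/bOuter) = B.
def bInner (n t nxt : Int) (sub : List Int) : Int × List Int :=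
  if nxt ≤ n ∧ nxt ≠ t then bInner n t (nxt + 1) (sub ++ [nxt]) else (nxt, sub)
termination_by (n + 1 - nxt).toNat
decreasing_by omega

def bOuter (n : Int) (rest sub : List Int) (nxt count : Int) : Int :=
  match rest with
  | [] => count
  | t :: rest' =>
    if sub.getLast? = some t then bOuter n rest' sub.dropLast nxt (count + 1)
    else
      if (bInner n t nxt sub).1 ≤ n ∧ (bInner n t nxt sub).1 = t then
        bOuter n rest' (bInner n t nxt sub).2 ((bInner n t nxt sub).1 + 1) (count + 1)
      else count

-- the count accumulator of bOuter only threads through and is returned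
theorem bOuter_shift (n : Int) (rest : List Int) : ∀ (sub : List Int) (nxt c : Int),
    bOuter n rest sub nxt c = c + bOuter n rest sub nxt 0 := by
  induction rest with
  | nil => intro sub nxt c; simp [bOuter]
  | cons t rest' ih =>
    intro sub nxt c
    rw [bOuter, bOuter]
    split
    · rw [ih _ _ (c + 1), ih _ _ (0 + 1)]; ring
    · split
      · rw [ih _ _ (c + 1), ih _ _ (0 + 1)]; ring
      · ring

-- pushing one belt box commutes with entering the intermediate inner loop
theorem bOuter_push (n t : Int) (rest sub : List Int) (nxt : Int)
    (h1 : nxt ≤ n) (h2 : nxt ≠ t) (h3 : sub.getLast? ≠ some t) :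
    bOuter n (t :: rest) sub nxt 0 = bOuter n (t :: rest) (sub ++ [nxt]) (nxt + 1) 0 := by
  have hb : bInner n t nxt sub = bInner n t (nxt + 1) (sub ++ [nxt]) := by
    rw [bInner]; simp [h1, h2]
  rw [bOuter, bOuter]
  simp [h3, h2, hb]

-- simulation 1: A's loop state (main = the belt from nxt, sub with all entries < nxt,
-- idx into order) computes truck.length plus what the intermediate computes
theorem simAB (order : List Int) : ∀ (k : Nat) (main sub truck : List Int) (nxt : Int) (i : Nat),
    2 * main.length + sub.length ≤ k →
    main = PySem.List.pyRange nxt ((order.length : Int) + 1) 1 →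
    (∀ x ∈ sub, x < nxt) →
    loopA order main sub truck (i : Int)
      = (truck.length : Int) + bOuter (order.length : Int) (order.drop i) sub nxt 0 := by
  intro k
  induction k using Nat.strong_induction_on with
  | _ k ih =>
  intro main sub truck nxt i hk hmain hsub
  cases hg : PySem.List.pyGet? order (i : Int) with
  | none =>
    have hlen : order.length ≤ i := by
      rw [PySem.List.pyGet?_natCast] at hg
      exact List.getElem?_eq_none_iff.mp hg
    rw [loopA]
    simp [canProceedA, hg, List.drop_eq_nil_of_le hlen, bOuter]
  | some t =>
    rw [PySem.List.pyGet?_natCast] at hg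
    have hi : i < order.length := by
      by_contra h
      rw [List.getElem?_eq_none_iff.mpr (by omega)] at hg
      exact absurd hg (by simp)
    have hdrop : order.drop i = t :: order.drop (i + 1) := by
      rw [List.drop_eq_getElem_cons hi]
      have h2 : order[i] = t := by
        have h3 := List.getElem?_eq_getElem hi
        rw [hg] at h3; exact (Option.some.inj h3).symm
      rw [h2]
    have hg' : PySem.List.pyGet? order (i : Int) = some t := by
      rw [PySem.List.pyGet?_natCast]; exact hg
    have hsubtop : ∀ y, sub.getLast? = some y → y < nxt := by
      intro y hy
      exact hsub y (List.mem_of_getLast? hy)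
    have hcast : (i : Int) + 1 = ((i + 1 : Nat) : Int) := by push_cast; ring
    by_cases hle : nxt ≤ (order.length : Int)
    · -- the belt is nonempty: main = nxt :: belt from nxt+1
      have hmc : main = nxt :: PySem.List.pyRange (nxt + 1) ((order.length : Int) + 1) 1 := by
        rw [hmain, PySem.List.pyRange_one_cons (by omega)]
      rw [loopA]
      simp only [hg', hmc, ne_eq, reduceCtorEq, not_false_eq_true, decide_true, Bool.true_or,
        if_true]
      by_cases hmt : nxt = t
      · -- load straight from the main belt
        subst hmt
        have hst : sub.getLast? ≠ some nxt := by
          intro h; exact absurd (hsubtop nxt h) (lt_irrefl nxt)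
        have hIH := ih (2 * (PySem.List.pyRange (nxt + 1) ((order.length : Int) + 1) 1).length
            + sub.length)
          (by rw [hmc] at hk; simp at hk ⊢; omega)
          _ sub (truck ++ [nxt]) (nxt + 1) (i + 1) (le_refl _) rfl
          (fun x hx => lt_of_lt_of_le (hsub x hx) (by omega))
        have hbi : bInner (order.length : Int) nxt nxt sub = (nxt, sub) := by
          rw [bInner]; simp
        have hs1 := bOuter_shift (order.length : Int) (order.drop (i + 1)) sub (nxt + 1) (0 + 1)
        rw [if_pos rfl, hcast, hIH, hdrop, bOuter, if_neg hst, hbi,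
          if_pos (⟨hle, rfl⟩ : (nxt, sub).1 ≤ (order.length : Int) ∧ (nxt, sub).1 = nxt), hs1]
        simp [List.length_append]; ring
      · by_cases hst : sub.getLast? = some t
        · -- load from the sub belt
          have hIH := ih (2 * main.length + sub.dropLast.length)
            (by
              have hs : sub ≠ [] := by intro h; rw [h] at hst; simp at hst
              have := List.length_pos_of_ne_nil hs
              simp [List.length_dropLast] at *; omega)
            main sub.dropLast (truck ++ [t]) nxt (i + 1) (le_refl _) hmain
            (fun x hx => hsub x (List.mem_of_mem_dropLast hx))
          rw [hmc] at hIH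
          have hs1 := bOuter_shift (order.length : Int) (order.drop (i + 1)) sub.dropLast nxt (0 + 1)
          rw [if_neg hmt, if_pos hst, hcast, hIH, hdrop, bOuter, if_pos hst, hs1]
          simp [List.length_append]; ring
        · -- push the head of the belt onto the sub belt
          have hIH := ih (2 * (PySem.List.pyRange (nxt + 1) ((order.length : Int) + 1) 1).length
              + (sub ++ [nxt]).length)
            (by rw [hmc] at hk; simp at hk ⊢; omega)
            _ (sub ++ [nxt]) truck (nxt + 1) i (le_refl _) rfl
            (by
              intro x hx
              rcases List.mem_append.mp hx with h | h
              · exact lt_of_lt_of_le (hsub x h) (by omega)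
              · simp at h; omega)
          rw [if_neg hmt, if_neg hst, hIH, hdrop,
            bOuter_push (order.length : Int) t (order.drop (i + 1)) sub nxt hle hmt hst]
    · -- the belt is exhausted
      have hmc : main = [] := by
        rw [hmain, PySem.List.pyRange_one_eq_nil (by omega)]
      by_cases hst : sub.getLast? = some t
      · -- load from the sub belt
        have hs : sub ≠ [] := by intro h; rw [h] at hst; simp at hst
        have hIH := ih (sub.dropLast.length)
          (by
            have := List.length_pos_of_ne_nil hs
            rw [hmc] at hk; simp [List.length_dropLast] at *; omega)
          [] sub.dropLast (truck ++ [t]) nxt (i + 1)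
          (by simp) (by rw [hmc] at hmain; exact hmain)
          (fun x hx => hsub x (List.mem_of_mem_dropLast hx))
        rw [loopA]
        have hcp : canProceedA order (i : Int) [] sub = true := by
          simp [canProceedA, hg', hs, hst]
        simp only [hmc, ne_eq, not_true_eq_false, decide_false, Bool.false_or, hcp, if_true, hg']
        have hs1 := bOuter_shift (order.length : Int) (order.drop (i + 1)) sub.dropLast nxt (0 + 1)
        rw [if_pos hst, hcast, hIH, hdrop, bOuter, if_pos hst, hs1]
        simp [List.length_append]; ring
      · -- nothing can be loaded: A exits its loop, the intermediate breaks
        rw [loopA]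
        have hcp : canProceedA order (i : Int) [] sub = false := by
          simp only [canProceedA, hg']
          cases hsl : sub.getLast? with
          | none => simp
          | some y => simp; intro _ h; exact hst (by rw [hsl, h])
        simp only [hmc, ne_eq, not_true_eq_false, decide_false, Bool.false_or, hcp, Bool.false_eq_true, if_false]
        rw [hdrop, bOuter]
        have hbi : bInner (order.length : Int) t nxt sub = (nxt, sub) := by
          rw [bInner]
          simp only [ite_eq_right_iff]
          rintro ⟨h, -⟩; omega
        rw [if_neg hst, hbi, if_neg
          (show ¬((nxt, sub).1 ≤ (order.length : Int) ∧ (nxt, sub).1 = t) by rintro ⟨h, -⟩; omega)]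
        ring

-- ===== lemmas for simulation 2 (intermediate = B) =====

-- the last element of a strictly increasing list bounds every element
theorem last_is_max : ∀ (l : List Int), l.Pairwise (· < ·) →
    ∀ g, l.getLast? = some g → ∀ u ∈ l, u ≤ g := by
  intro l
  induction l with
  | nil => intro _ g hg; simp at hg
  | cons a l' ih =>
    intro hp g hg u hu
    cases l' with
    | nil =>
      simp at hg hu; omega
    | cons b l'' =>
      have hg' : (b :: l'').getLast? = some g := by simpa using hg
      rcases List.mem_cons.mp hu with rfl | hu'
      · have hgm : g ∈ b :: l'' := List.mem_of_getLast? hg'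
        exact le_of_lt ((List.pairwise_cons.mp hp).1 g hgm)
      · exact ih (List.pairwise_cons.mp hp).2 g hg' u hu'

-- scanDown stops exactly at the greatest value ≤ x outside `loaded` (or at 0)
theorem scanDown_eq (loaded : PySem.Set Int) (g : Int) (hg0 : 0 ≤ g)
    (hstop : g = 0 ∨ g ∉ loaded) :
    ∀ (k : Nat) (x : Int), x = g + k → (∀ v, g < v → v ≤ x → v ∈ loaded) →
    scanDown loaded x = g := by
  intro k
  induction k with
  | zero =>
    intro x hx _
    have : x = g := by omega
    subst this
    rw [scanDown, dif_neg]
    rintro ⟨h1, h2⟩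
    rcases hstop with h | h
    · omega
    · exact h ((PySem.Set.contains_iff _ _).mp h2)
  | succ k ih =>
    intro x hx hmid
    have hgx : g < x := by omega
    rw [scanDown, dif_pos ⟨by omega, (PySem.Set.contains_iff _ _).mpr (hmid x hgx le_rfl)⟩]
    exact ih (x - 1) (by omega) (fun v h1 h2 => hmid v h1 (by omega))

-- when nxt ≤ t ≤ n, the intermediate inner loop pushes nxt..t-1 and stops at t
theorem bInner_reach (n t : Int) : ∀ (k : Nat) (nxt : Int) (sub : List Int),
    t = nxt + k → t ≤ n →
    bInner n t nxt sub = (t, sub ++ PySem.List.pyRange nxt t 1) := by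
  intro k
  induction k with
  | zero =>
    intro nxt sub h _
    have : nxt = t := by omega
    subst this
    rw [bInner]
    simp [PySem.List.pyRange_one_eq_nil (le_refl nxt)]
  | succ k ih =>
    intro nxt sub h hn
    rw [bInner, if_pos ⟨by omega, by omega⟩, ih (nxt + 1) (sub ++ [nxt]) (by omega) hn,
      PySem.List.pyRange_one_cons (show nxt < t by omega)]
    simp

-- the intermediate inner loop never moves nxt backwards
theorem bInner_ge (n t : Int) : ∀ (k : Nat) (nxt : Int) (sub : List Int),
    (n + 1 - nxt).toNat ≤ k → nxt ≤ (bInner n t nxt sub).1 := by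
  intro k
  induction k with
  | zero =>
    intro nxt sub hk
    rw [bInner, if_neg (by rintro ⟨h, -⟩; omega)]
  | succ k ih =>
    intro nxt sub hk
    rw [bInner]
    split
    · next h => exact le_trans (by omega) (ih (nxt + 1) (sub ++ [nxt]) (by omega))
    · exact le_rfl

-- simulation 2: the intermediate's stack state (sub, nxt) is determined by B's state
-- (loaded, M, top): nxt = M+1, sub = the increasing list of boxes in [1,M] not loaded,
-- top = the top of that stack (0 if empty); under that invariant they compute the same count
theorem simBC (n : Int) : ∀ (rest sub : List Int) (loaded : PySem.Set Int) (M top c : Int),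
    0 ≤ M →
    sub.Pairwise (· < ·) →
    (∀ u ∈ sub, 1 ≤ u ∧ u ≤ M) →
    (∀ u : Int, u ∈ loaded ↔ (1 ≤ u ∧ u ≤ M ∧ u ∉ sub)) →
    top = (sub.getLast?).getD 0 →
    bOuter n rest sub (M + 1) c = bLoop n rest loaded M top c := by
  intro rest
  induction rest with
  | nil => intro sub loaded M top c _ _ _ _ _; rw [bOuter, bLoop]
  | cons t rest' ih =>
    intro sub loaded M top c hM hp hb hmem htop
    by_cases hpop : sub.getLast? = some t
    · -- pop from the implicit stack = B's t == top branch
      obtain ⟨ys, rfl⟩ := List.getLast?_eq_some_iff.mp hpop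
      have hys_lt : ∀ u ∈ ys, u < t := by
        intro u hu
        exact (List.pairwise_append.mp hp).2.2 u hu t (by simp)
      have ht1 : 1 ≤ t := (hb t (by simp)).1
      have htM : t ≤ M := (hb t (by simp)).2
      have htop' : top = t := by
        rw [htop]; simp
      have hcond : top ≠ 0 ∧ t = top := ⟨by omega, htop'.symm⟩
      -- the scan recovers the new stack top
      have hmem' : ∀ u : Int, u ∈ PySem.Set.add loaded t ↔ (1 ≤ u ∧ u ≤ M ∧ u ∉ ys) := by
        intro u
        rw [PySem.Set.mem_add]
        constructor
        · rintro (hu | rfl)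
          · have := (hmem u).mp hu
            exact ⟨this.1, this.2.1, fun hy => this.2.2 (by simp [hy])⟩
          · exact ⟨ht1, htM, fun hy => absurd (hys_lt u hy) (lt_irrefl u)⟩
        · rintro ⟨h1, h2, h3⟩
          by_cases hut : u = t
          · right; exact hut
          · left
            exact (hmem u).mpr ⟨h1, h2, by simp [h3, hut]⟩
      have hscan : scanDown (PySem.Set.add loaded t) (t - 1) = (ys.getLast?).getD 0 := by
        cases hys : ys.getLast? with
        | none =>
          have hysnil : ys = [] := by
            cases ys with
            | nil => rfl
            | cons a l => simp at hys
          subst hysnil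
          refine scanDown_eq _ 0 le_rfl (Or.inl rfl) (t - 1).toNat (t - 1) (by omega) ?_
          intro v hv1 hv2
          exact (hmem' v).mpr ⟨by omega, by omega, by simp⟩
        | some g =>
          have hgys : g ∈ ys := List.mem_of_getLast? hys
          have hg1 : 1 ≤ g := (hb g (by simp [hgys])).1
          have hgt : g < t := hys_lt g hgys
          have hmax : ∀ u ∈ ys, u ≤ g :=
            last_is_max ys ((List.pairwise_append.mp hp).1) g hys
          refine scanDown_eq _ g (by omega)
            (Or.inr (fun hg => ((hmem' g).mp hg).2.2 hgys)) (t - 1 - g).toNat (t - 1)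
            (by omega) ?_
          intro v hv1 hv2
          refine (hmem' v).mpr ⟨by omega, by omega, fun hv => ?_⟩
          exact absurd (hmax v hv) (by omega)
      rw [bOuter, if_pos hpop, bLoop, if_pos hcond, List.dropLast_concat, htop', hscan]
      exact ih ys (PySem.Set.add loaded t) M _ (c + 1) hM
        ((List.pairwise_append.mp hp).1)
        (fun u hu => hb u (by simp [hu])) hmem' rfl
    · -- t is not the stack top
      have hcond : ¬(top ≠ 0 ∧ t = top) := by
        rintro ⟨h0, rfl⟩
        apply hpop
        cases hlast : sub.getLast? with
        | none => rw [htop, hlast] at h0; simp at h0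
        | some g => rw [htop, hlast] at h0 ⊢; rfl
      by_cases hdir : M < t ∧ t ≤ n
      · -- load straight from the belt: the intermediate pushes M+1..t-1 first
        obtain ⟨hMt, htn⟩ := hdir
        have hbi := bInner_reach n t (t - (M + 1)).toNat (M + 1) sub (by omega) htn
        have hcheck : (bInner n t (M + 1) sub).1 ≤ n ∧ (bInner n t (M + 1) sub).1 = t := by
          rw [hbi]; exact ⟨htn, rfl⟩
        rw [bOuter, if_neg hpop, if_pos hcheck, bLoop, if_neg hcond, if_pos ⟨hMt, htn⟩, hbi]
        have hR : ∀ u ∈ PySem.List.pyRange (M + 1) t 1, M + 1 ≤ u ∧ u < t := by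
          intro u hu; exact PySem.List.mem_pyRange_one.mp hu
        refine ih (sub ++ PySem.List.pyRange (M + 1) t 1) (PySem.Set.add loaded t) t _ (c + 1)
          (by omega) ?_ ?_ ?_ ?_
        · rw [List.pairwise_append]
          refine ⟨hp, PySem.List.pairwise_lt_pyRange_one _ _, ?_⟩
          intro u hu v hv
          have := (hb u hu).2
          have := (hR v hv).1
          omega
        · intro u hu
          rcases List.mem_append.mp hu with h | h
          · have := hb u h; omega
          · have := hR u h; omega
        · intro u
          rw [PySem.Set.mem_add]
          constructor
          · rintro (hu | rfl)
            · obtain ⟨h1, h2, h3⟩ := (hmem u).mp hu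
              refine ⟨h1, by omega, ?_⟩
              intro hu'
              rcases List.mem_append.mp hu' with h | h
              · exact h3 h
              · have := (hR u h).1; omega
            · refine ⟨by omega, le_rfl, ?_⟩
              intro hu'
              rcases List.mem_append.mp hu' with h | h
              · have := (hb u h).2; omega
              · have := (hR u h).2; omega
          · rintro ⟨h1, h2, h3⟩
            by_cases hut : u = t
            · right; exact hut
            · left
              refine (hmem u).mpr ⟨h1, ?_, fun h => h3 (List.mem_append.mpr (Or.inl h))⟩
              by_contra hMu
              exact h3 (List.mem_append.mpr (Or.inr
                (PySem.List.mem_pyRange_one.mpr ⟨by omega, by omega⟩)))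
        · by_cases hM1 : M < t - 1
          · rw [if_pos hM1]
            have hRsplit : PySem.List.pyRange (M + 1) t 1
                = PySem.List.pyRange (M + 1) (t - 1) 1 ++ [t - 1] := by
              have := PySem.List.pyRange_one_succ_right (a := M + 1) (b := t - 1) (by omega)
              simpa using this
            rw [hRsplit, ← List.append_assoc]
            simp
          · rw [if_neg hM1]
            have : t = M + 1 := by omega
            subst this
            rw [PySem.List.pyRange_one_eq_nil (by omega), List.append_nil]
            exact htop
      · -- unloadable target: both break
        have hbreak : ¬((bInner n t (M + 1) sub).1 ≤ n ∧ (bInner n t (M + 1) sub).1 = t) := by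
          rintro ⟨h1, h2⟩
          rcases not_and_or.mp hdir with h | h
          · have := bInner_ge n t (n + 1 - (M + 1)).toNat (M + 1) sub le_rfl
            omega
          · omega
        rw [bOuter, if_neg hpop, if_neg hbreak, bLoop, if_neg hcond, if_neg hdir]

-- ===== VERDICT (by name: the statement is the Claim_ definition above) =====
theorem solution_spec : Claim_equal_solution := by
  intro order _
  unfold Spec_solution solution solution_alt
  have h := simAB order
    (2 * (PySem.List.pyRange 1 ((order.length : Int) + 1) 1).length)
    (PySem.List.pyRange 1 ((order.length : Int) + 1) 1) [] [] 1 0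
    (by simp) rfl (by simp)
  have h2 := simBC (order.length : Int) order [] PySem.Set.empty 0 0 0
    le_rfl (by simp) (by simp) (by intro u; simp [PySem.Set.empty]; omega) (by simp)
  norm_num at h2
  simpa [h2] using h
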